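-- pv_equiv track=rewrite | github.com/pygfx/gfxmorph | gfxmorph/meshfuncs.py | face_get_neighbours2
-- ===== SOURCE A (Python) =====
-- def face_get_neighbours2(faces, vertex2faces, fi):
--     """Get two sets of face indices that neighbour the given face index.
--
--     The first comprises of both vertex- and edge connections, the second
--     only consists of faces connected via an edge.
--     """
--     neighbour_faces1 = set()
--     neighbour_faces2 = set()
--     for vi in faces[fi]:
--         for fi2 in vertex2faces[vi]:
--             if fi2 == fi:
--                 pass
--             elif fi2 in neighbour_faces1:
--                 neighbour_faces2.add(fi2)
--             else:
--                 neighbour_faces1.add(fi2)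
--     return neighbour_faces1, neighbour_faces2
-- ===== SOURCE B (Python) =====
-- def face_get_neighbours2(faces, vertex2faces, fi):
--     """Flatten-then-derive decomposition: build the stream of incident faces
--     (excluding fi), then derive set1 = all of them and set2 = those that repeat."""
--     stream = [fi2 for vi in faces[fi] for fi2 in vertex2faces[vi] if fi2 != fi]
--     repeats = [x for i, x in enumerate(stream) if x in stream[:i]]
--     return set(stream), set(repeats)
-- ===== Notes on version B (the rewrite author's own statement) =====
-- stated objective: alternative
-- what changed: Replaces A's incremental two-set loop with an in-branch membership test by a flatten-then-derive decomposition: first build the flat stream of incident faces (excluding fi), then derive set1 as all stream elements and set2 as the elements that occur a second time.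
import Mathlib
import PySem

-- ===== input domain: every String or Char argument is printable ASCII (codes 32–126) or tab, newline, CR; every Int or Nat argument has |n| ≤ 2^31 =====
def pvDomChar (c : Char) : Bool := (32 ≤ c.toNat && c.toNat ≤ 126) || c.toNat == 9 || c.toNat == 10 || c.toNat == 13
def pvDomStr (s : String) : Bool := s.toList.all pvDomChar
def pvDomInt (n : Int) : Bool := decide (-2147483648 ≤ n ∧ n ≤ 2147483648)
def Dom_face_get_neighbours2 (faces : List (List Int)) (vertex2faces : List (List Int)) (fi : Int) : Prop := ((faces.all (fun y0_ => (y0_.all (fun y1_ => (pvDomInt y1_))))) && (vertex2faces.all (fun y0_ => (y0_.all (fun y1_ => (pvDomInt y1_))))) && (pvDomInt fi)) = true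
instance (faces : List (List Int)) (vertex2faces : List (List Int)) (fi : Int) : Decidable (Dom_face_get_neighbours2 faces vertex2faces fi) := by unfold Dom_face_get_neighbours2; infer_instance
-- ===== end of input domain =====

-- B replaces A's incremental two-set branch loop by a flatten-then-derive decomposition
-- (build the incidence stream, then derive set1 = all elements, set2 = repeated elements);
-- objective: alternative decomposition, not speed.

-- ===== PORT A =====
-- the body of A's inner loop: skip fi, promote to set2 on a repeat, else add to set1
def fgnStep (fi : Int) (s : PySem.Set Int × PySem.Set Int) (fi2 : Int) :
    PySem.Set Int × PySem.Set Int :=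
  if fi2 = fi then s
  else if PySem.Set.contains s.1 fi2 then (s.1, PySem.Set.add s.2 fi2)
  else (PySem.Set.add s.1 fi2, s.2)

-- faces[fi] / vertex2faces[vi] as pyGetD: total form, exact under Pre_ (in-range indices)
def face_get_neighbours2 (faces : List (List Int)) (vertex2faces : List (List Int)) (fi : Int) : List Int × List Int :=
  (PySem.List.pyGetD faces fi []).foldl
    (fun s vi => (PySem.List.pyGetD vertex2faces vi []).foldl (fgnStep fi) s)
    (PySem.Set.empty, PySem.Set.empty)

-- ===== PORT B =====
-- stream = [fi2 for vi in faces[fi] for fi2 in vertex2faces[vi] if fi2 != fi]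
-- repeats = [x for i, x in enumerate(stream) if x in stream[:i]]
-- return set(stream), set(repeats)
def face_get_neighbours2_alt (faces : List (List Int)) (vertex2faces : List (List Int)) (fi : Int) : List Int × List Int :=
  let stream := ((PySem.List.pyGetD faces fi []).flatMap
      (fun vi => PySem.List.pyGetD vertex2faces vi [])).filter (fun fi2 => fi2 != fi)
  let repeats := ((PySem.List.enumerate stream).filter
      (fun p => (PySem.List.slice stream none (some p.1)).contains p.2)).map (·.2)
  (PySem.Set.ofList stream, PySem.Set.ofList repeats)

-- ===== PRECONDITION & SPEC =====
-- exactly where Python A returns: fi indexes faces, and every vi in faces[fi] indexes vertex2faces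
def Pre_face_get_neighbours2 (faces : List (List Int)) (vertex2faces : List (List Int)) (fi : Int) : Prop :=
  PySem.Raise.InRange faces.length fi ∧
  ∀ vi ∈ PySem.List.pyGetD faces fi ([] : List Int), PySem.Raise.InRange vertex2faces.length vi
instance (faces : List (List Int)) (vertex2faces : List (List Int)) (fi : Int) : Decidable (Pre_face_get_neighbours2 faces vertex2faces fi) := by unfold Pre_face_get_neighbours2; infer_instance

def pvWitness_face_get_neighbours2 : List (List Int) × List (List Int) × Int := ([[0]], [[0, 1]], 0)

def Spec_face_get_neighbours2 (faces : List (List Int)) (vertex2faces : List (List Int)) (fi : Int) (out : List Int × List Int) : Prop := out = face_get_neighbours2_alt faces vertex2faces fi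
instance (faces : List (List Int)) (vertex2faces : List (List Int)) (fi : Int) (out : List Int × List Int) : Decidable (Spec_face_get_neighbours2 faces vertex2faces fi out) := by unfold Spec_face_get_neighbours2; infer_instance

-- ===== CLAIM (what is proved, stated in full; the proofs are below) =====
def Claim_equal_face_get_neighbours2 : Prop := ∀ (faces : List (List Int)) (vertex2faces : List (List Int)) (fi : Int), Dom_face_get_neighbours2 faces vertex2faces fi → Pre_face_get_neighbours2 faces vertex2faces fi → Spec_face_get_neighbours2 faces vertex2faces fi (face_get_neighbours2 faces vertex2faces fi)

-- ===== LEMMAS AND PROOFS =====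

-- the elements of t that already occurred (in `pre ++ earlier part of t`), in occurrence order
def fgnRep (pre : List Int) : List Int → List Int
  | [] => []
  | x :: xs => (if x ∈ pre then [x] else []) ++ fgnRep (pre ++ [x]) xs

theorem fgn_ofList_append_singleton (pre : List Int) (x : Int) :
    PySem.Set.ofList (pre ++ [x]) = PySem.Set.add (PySem.Set.ofList pre) x := by
  simp [PySem.Set.ofList_eq_foldl, List.foldl_append]

theorem fgn_contains_ofList (pre : List Int) (x : Int) :
    PySem.Set.contains (PySem.Set.ofList pre) x = decide (x ∈ pre) := by
  have : PySem.Set.contains (PySem.Set.ofList pre) x = List.contains (PySem.Set.ofList pre) x := rfl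
  rw [this, List.contains_eq_mem]
  simp [PySem.Set.mem_ofList]

theorem fgn_add_of_mem (pre : List Int) (x : Int) (h : x ∈ pre) :
    PySem.Set.add (PySem.Set.ofList pre) x = PySem.Set.ofList pre := by
  show (if PySem.Set.contains (PySem.Set.ofList pre) x then PySem.Set.ofList pre
        else PySem.Set.ofList pre ++ [x]) = PySem.Set.ofList pre
  rw [fgn_contains_ofList]
  simp [h]

-- the loop invariant of A's fold: set1 tracks all elements seen, set2 collects the repeats
theorem fgn_foldl_inv (fi : Int) (t : List Int) :
    ∀ (pre : List Int) (s2 : PySem.Set Int), (∀ x ∈ t, x ≠ fi) →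
      t.foldl (fgnStep fi) (PySem.Set.ofList pre, s2) =
        (PySem.Set.ofList (pre ++ t), (fgnRep pre t).foldl PySem.Set.add s2) := by
  induction t with
  | nil => intro pre s2 _; simp [fgnRep]
  | cons x xs ih =>
    intro pre s2 hne
    have hx : x ≠ fi := hne x (by simp)
    by_cases hmem : x ∈ pre
    · have hstep : fgnStep fi (PySem.Set.ofList pre, s2) x =
          (PySem.Set.ofList pre, PySem.Set.add s2 x) := by
        simp [fgnStep, hx, hmem]
      have hpre : PySem.Set.ofList pre = PySem.Set.ofList (pre ++ [x]) := by
        rw [fgn_ofList_append_singleton, fgn_add_of_mem pre x hmem]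
      calc (x :: xs).foldl (fgnStep fi) (PySem.Set.ofList pre, s2)
          = xs.foldl (fgnStep fi) (PySem.Set.ofList (pre ++ [x]), PySem.Set.add s2 x) := by
            simp [List.foldl_cons, hstep, ← hpre]
        _ = (PySem.Set.ofList ((pre ++ [x]) ++ xs),
              (fgnRep (pre ++ [x]) xs).foldl PySem.Set.add (PySem.Set.add s2 x)) :=
            ih (pre ++ [x]) (PySem.Set.add s2 x) (fun y hy => hne y (by simp [hy]))
        _ = (PySem.Set.ofList (pre ++ x :: xs), (fgnRep pre (x :: xs)).foldl PySem.Set.add s2) := by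
            simp [fgnRep, hmem, List.append_assoc]
    · have hstep : fgnStep fi (PySem.Set.ofList pre, s2) x =
          (PySem.Set.add (PySem.Set.ofList pre) x, s2) := by
        simp [fgnStep, hx, hmem]
      calc (x :: xs).foldl (fgnStep fi) (PySem.Set.ofList pre, s2)
          = xs.foldl (fgnStep fi) (PySem.Set.ofList (pre ++ [x]), s2) := by
            simp [List.foldl_cons, hstep, fgn_ofList_append_singleton]
        _ = (PySem.Set.ofList ((pre ++ [x]) ++ xs),
              (fgnRep (pre ++ [x]) xs).foldl PySem.Set.add s2) :=
            ih (pre ++ [x]) s2 (fun y hy => hne y (by simp [hy]))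
        _ = (PySem.Set.ofList (pre ++ x :: xs), (fgnRep pre (x :: xs)).foldl PySem.Set.add s2) := by
            simp [fgnRep, hmem, List.append_assoc]

-- folding A's step over a list equals folding it over the list with fi filtered out
theorem fgn_foldl_filter (fi : Int) (l : List Int) :
    ∀ s : PySem.Set Int × PySem.Set Int,
      l.foldl (fgnStep fi) s = (l.filter (fun x => x != fi)).foldl (fgnStep fi) s := by
  induction l with
  | nil => intro s; rfl
  | cons x xs ih =>
    intro s
    by_cases hx : x = fi
    · simp [hx, fgnStep, ih]
    · simp [hx, List.foldl_cons, ih]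

-- B's enumerate/slice comprehension computes exactly fgnRep
theorem fgn_rep_eq (stream : List Int) : ∀ (t pre : List Int), stream = pre ++ t →
    ((PySem.List.enumerate t (pre.length : Int)).filter
        (fun p => (PySem.List.slice stream none (some p.1)).contains p.2)).map (·.2) =
      fgnRep pre t := by
  intro t
  induction t with
  | nil => intro pre _; simp [PySem.List.enumerate, fgnRep]
  | cons x xs ih =>
    intro pre hs
    have hslice : PySem.List.slice stream none (some (pre.length : Int)) = pre := by
      rw [PySem.List.slice_to stream (Int.natCast_nonneg pre.length)]
      simp [hs]
    have hs' : stream = (pre ++ [x]) ++ xs := by simp [hs]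
    have hih := ih (pre ++ [x]) hs'
    rw [PySem.List.enumerate_cons]
    by_cases hmem : x ∈ pre
    · simp [hslice, fgnRep, hmem]
      simpa using hih
    · simp [hslice, fgnRep, hmem]
      simpa using hih

-- ===== VERDICT (by name: the statement is the Claim_ definition above) =====
theorem face_get_neighbours2_spec : Claim_equal_face_get_neighbours2 := by
  intro faces vertex2faces fi _ _
  unfold Spec_face_get_neighbours2
  show face_get_neighbours2 faces vertex2faces fi = _
  simp only [face_get_neighbours2, face_get_neighbours2_alt, ← List.foldl_flatMap]
  rw [fgn_foldl_filter fi]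
  set stream := (((PySem.List.pyGetD faces fi []).flatMap
      (fun vi => PySem.List.pyGetD vertex2faces vi [])).filter (fun x => x != fi)) with hst
  have hne : ∀ x ∈ stream, x ≠ fi := by
    intro x hx
    have := List.of_mem_filter hx
    simpa using this
  show List.foldl (fgnStep fi) (PySem.Set.ofList [], PySem.Set.ofList []) stream = _
  rw [fgn_foldl_inv fi stream [] (PySem.Set.ofList []) hne]
  have hrep := fgn_rep_eq stream stream [] (by simp)
  simp only [List.length_nil, Nat.cast_zero] at hrep
  simp only [PySem.Set.ofList_eq_foldl]
  rw [hrep]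
  rfl
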